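-- pv_equiv track=rewrite | github.com/ev28032024/forward | src/forward_monitor/config.py | _validate_message_types
-- ===== SOURCE A (Python) =====
-- from collections.abc import Iterable, Iterator, Mapping, Sequence
-- from typing import Any, Final, Literal, MutableMapping, cast
--
-- _VALID_MESSAGE_TYPES: Final[frozenset[str]] = frozenset(
--     {
--         "text",
--         "attachment",
--         "image",
--         "video",
--         "audio",
--         "file",
--         "document",
--         "other",
--     }
-- )
--
-- def _validate_message_types(values: Sequence[str], label: str) -> tuple[str, ...]:
--     if not values:
--         return ()
--     cleaned: list[str] = []
--     invalid: list[str] = []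
--     for value in values:
--         text = value.strip()
--         if not text:
--             continue
--         normalised = text.casefold()
--         if normalised not in _VALID_MESSAGE_TYPES:
--             invalid.append(value)
--             continue
--         cleaned.append(text)
--     if invalid:
--         expected = ", ".join(sorted(_VALID_MESSAGE_TYPES))
--         formatted = ", ".join(invalid)
--         raise ValueError(
--             f"Unsupported message type(s) in '{label}': {formatted}. "
--             f"Allowed values: {expected}"
--         )
--     return tuple(cleaned)
-- ===== SOURCE B (Python) =====
-- _VALID_MESSAGE_TYPES = frozenset(
--     {
--         "text",
--         "attachment",
--         "image",
--         "video",
--         "audio",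
--         "file",
--         "document",
--         "other",
--     }
-- )
--
--
-- def _validate_message_types(values, label):
--     # Pass 1: validate everything first.
--     invalid = [
--         value
--         for value in values
--         if (text := value.strip()) and text.casefold() not in _VALID_MESSAGE_TYPES
--     ]
--     if invalid:
--         expected = ", ".join(sorted(_VALID_MESSAGE_TYPES))
--         formatted = ", ".join(invalid)
--         raise ValueError(
--             f"Unsupported message type(s) in '{label}': {formatted}. "
--             f"Allowed values: {expected}"
--         )
--     # Pass 2: everything non-empty is known valid; just produce the stripped texts.
--     return tuple(text for value in values if (text := value.strip()))
-- ===== Notes on version B (the rewrite author's own statement) =====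
-- stated objective: simpler
-- what changed: Replaces A's single loop that interleaves two accumulators (cleaned and invalid) with a validate-then-build two-pass form: a first comprehension collects the invalid originals (raising if any), and a second comprehension simply yields every non-empty stripped text, with no validity check needed in the build pass.
import Mathlib
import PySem

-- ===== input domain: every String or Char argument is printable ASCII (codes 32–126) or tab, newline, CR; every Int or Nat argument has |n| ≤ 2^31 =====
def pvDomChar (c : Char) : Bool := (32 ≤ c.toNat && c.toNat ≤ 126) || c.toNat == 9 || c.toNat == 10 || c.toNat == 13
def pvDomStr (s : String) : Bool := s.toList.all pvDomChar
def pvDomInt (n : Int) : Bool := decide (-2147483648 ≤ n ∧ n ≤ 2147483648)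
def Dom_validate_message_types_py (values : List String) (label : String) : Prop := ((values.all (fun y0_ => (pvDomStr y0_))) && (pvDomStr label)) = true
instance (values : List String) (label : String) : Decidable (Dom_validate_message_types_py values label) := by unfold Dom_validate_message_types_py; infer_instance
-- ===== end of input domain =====

-- B restructures A's single two-accumulator loop into a validate-then-build two-pass form (objective: simpler).
-- The equivalence is about the RETURN value; where Python raises ValueError the inputs are excluded by Pre_.
-- Python's casefold is ported as PySem.Str.lower — exact on the ASCII domain stated by Dom_.

-- _VALID_MESSAGE_TYPES (frozenset membership ported as list membership)
def pvValidTypes : List String :=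
  ["text", "attachment", "image", "video", "audio", "file", "document", "other"]

-- ===== PORT A =====
-- one loop: strip; skip empties; invalid collects the original value, cleaned the stripped text;
-- a non-empty invalid means Python raises (outside Pre_; the port returns [] there).
def validate_message_types_py (values : List String) (label : String) : List String :=
  if values = [] then []
  else
    let r := values.foldl
      (fun (acc : List String × List String) value =>
        let text := PySem.Str.strip value
        if text.toList = [] then acc
        else
          let normalised := PySem.Str.lower text
          if normalised ∉ pvValidTypes then (acc.1, acc.2 ++ [value])
          else (acc.1 ++ [text], acc.2))
      ([], [])
    if r.2 = [] then r.1 else []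

-- ===== PORT B =====
-- pass 1: collect invalid originals (non-empty would raise, outside Pre_: return []);
-- pass 2: yield every non-empty stripped text.
def validate_message_types_py_alt (values : List String) (label : String) : List String :=
  let invalid := values.filter
    (fun value =>
      let text := PySem.Str.strip value
      decide (text.toList ≠ []) && decide (PySem.Str.lower text ∉ pvValidTypes))
  if invalid = [] then
    values.filterMap
      (fun value =>
        let text := PySem.Str.strip value
        if text.toList = [] then none else some text)
  else []

-- ===== PRECONDITION & SPEC =====
-- Pre_ excludes exactly the inputs where A raises ValueError: some value strips to
-- non-empty text whose casefold is not a valid message type.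
def Pre_validate_message_types_py (values : List String) (label : String) : Prop :=
  ∀ v ∈ values, (PySem.Str.strip v).toList = [] ∨ PySem.Str.lower (PySem.Str.strip v) ∈ pvValidTypes
instance (values : List String) (label : String) : Decidable (Pre_validate_message_types_py values label) := by
  unfold Pre_validate_message_types_py; infer_instance

def pvWitness_validate_message_types_py : List String × String := (["text", " Image ", "  "], "types")

def Spec_validate_message_types_py (values : List String) (label : String) (out : List String) : Prop := out = validate_message_types_py_alt values label
instance (values : List String) (label : String) (out : List String) : Decidable (Spec_validate_message_types_py values label out) := by unfold Spec_validate_message_types_py; infer_instance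

-- ===== CLAIM (what is proved, stated in full; the proofs are below) =====
def Claim_equal_validate_message_types_py : Prop := ∀ (values : List String) (label : String), Dom_validate_message_types_py values label → Pre_validate_message_types_py values label → Spec_validate_message_types_py values label (validate_message_types_py values label)

-- ===== LEMMAS AND PROOFS =====

-- Under Pre_, A's fold never touches the invalid accumulator and cleaned is the filterMap of B's pass 2.
theorem pv_foldA (values : List String)
    (h : ∀ v ∈ values, (PySem.Str.strip v).toList = [] ∨ PySem.Str.lower (PySem.Str.strip v) ∈ pvValidTypes)
    (acc : List String) :
    values.foldl
      (fun (acc : List String × List String) value =>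
        let text := PySem.Str.strip value
        if text.toList = [] then acc
        else
          let normalised := PySem.Str.lower text
          if normalised ∉ pvValidTypes then (acc.1, acc.2 ++ [value])
          else (acc.1 ++ [text], acc.2))
      (acc, [])
    = (acc ++ values.filterMap
        (fun value =>
          let text := PySem.Str.strip value
          if text.toList = [] then none else some text), []) := by
  induction values generalizing acc with
  | nil => simp
  | cons v vs ih =>
    have hv := h v (by simp)
    have hvs : ∀ w ∈ vs, (PySem.Str.strip w).toList = [] ∨ PySem.Str.lower (PySem.Str.strip w) ∈ pvValidTypes :=
      fun w hw => h w (by simp [hw])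
    by_cases he : (PySem.Str.strip v).toList = []
    · rw [List.foldl_cons, List.filterMap_cons]
      simp only [if_pos he]
      simpa using ih hvs acc
    · have hv' : PySem.Str.lower (PySem.Str.strip v) ∈ pvValidTypes := hv.resolve_left he
      have hmem : ¬ (PySem.Str.lower (PySem.Str.strip v) ∉ pvValidTypes) := fun hn => hn hv'
      rw [List.foldl_cons, List.filterMap_cons]
      simp only [if_neg he, if_neg hmem]
      rw [ih hvs (acc ++ [PySem.Str.strip v])]
      simp

-- ===== VERDICT (by name: the statement is the Claim_ definition above) =====
theorem validate_message_types_py_spec : Claim_equal_validate_message_types_py := by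
  intro values label _ hpre
  unfold Spec_validate_message_types_py validate_message_types_py validate_message_types_py_alt
  have hfilt : values.filter
      (fun value =>
        let text := PySem.Str.strip value
        decide (text.toList ≠ []) && decide (PySem.Str.lower text ∉ pvValidTypes)) = [] := by
    rw [List.filter_eq_nil_iff]
    intro v hv
    rcases hpre v hv with h | h <;> simp [h]
  rw [hfilt]
  by_cases hnil : values = []
  · simp [hnil]
  · rw [if_neg hnil, if_pos rfl]
    rw [pv_foldA values hpre []]
    simp
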